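-- pv_equiv track=rewrite | github.com/sakha-sakhar/krestiki-noliki | крестики нолики.py | check_streak_n
-- ===== SOURCE A (Python) =====
-- def check_streak_n(seq, n):
--     if len(seq) < n:
--         return 0
--     st = 0
--     last = 0
--     for i in seq:
--         if i == last:
--             st += 1
--         else:
--             last = i
--             st = 1
--         if last and st >= n:
--             return last
--     return 0
-- ===== SOURCE B (Python) =====
-- def check_streak_n(seq, n):
--     if len(seq) < n:
--         return 0
--     L = len(seq)
--     j = 0
--     while j < L:
--         k = seq[j]
--         j2 = j + 1
--         while j2 < L and seq[j2] == k:
--             j2 += 1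
--         if k and j2 - j >= n:
--             return k
--         j = j2
--     return 0
-- ===== Notes on version B (the rewrite author's own statement) =====
-- stated objective: alternative
-- what changed: B partitions the sequence into maximal runs of equal elements (outer loop per run, inner loop consuming and counting it) and tests each whole run once, instead of A's single-pass state machine carrying (last, streak) and checking after every element.
import Mathlib
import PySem

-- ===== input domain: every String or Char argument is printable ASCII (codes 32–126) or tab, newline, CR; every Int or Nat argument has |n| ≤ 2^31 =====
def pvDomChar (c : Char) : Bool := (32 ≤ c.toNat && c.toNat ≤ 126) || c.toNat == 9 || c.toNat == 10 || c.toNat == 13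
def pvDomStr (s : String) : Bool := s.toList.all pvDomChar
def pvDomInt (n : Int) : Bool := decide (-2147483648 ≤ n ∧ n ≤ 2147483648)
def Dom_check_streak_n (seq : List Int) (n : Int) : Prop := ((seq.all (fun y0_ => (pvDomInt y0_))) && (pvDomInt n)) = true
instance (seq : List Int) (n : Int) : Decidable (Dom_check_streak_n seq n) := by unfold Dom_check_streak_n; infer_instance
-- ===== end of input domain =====

-- B decomposes the sequence into maximal runs (outer loop per run, inner index loop measuring it) instead of A's (last, streak) state machine; equivalence proved on all inputs.

-- ===== PORT A =====
-- A's for-loop with early return, state (st, last)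
def check_streak_n_loop (n : Int) : List Int → Int → Int → Int
  | [], _, _ => 0
  | i :: rest, st, last =>
    let st' := if i = last then st + 1 else 1
    let last' := if i = last then last else i
    if last' ≠ 0 ∧ st' ≥ n then last' else check_streak_n_loop n rest st' last'

def check_streak_n (seq : List Int) (n : Int) : Int :=
  if (seq.length : Int) < n then 0 else check_streak_n_loop n seq 0 0

-- ===== PORT B =====
-- Source B's inner while: advance j2 past the run of k
def check_streak_n_inner (seq : List Int) (k : Int) (j2 : Nat) : Nat :=
  if h : j2 < seq.length then
    if seq[j2] = k then check_streak_n_inner seq k (j2 + 1) else j2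
  else j2
  termination_by seq.length - j2

-- the inner while never moves j2 backwards (cited by the outer loop's termination proof)
theorem check_streak_n_inner_ge (seq : List Int) (k : Int) : ∀ j2 : Nat, j2 ≤ check_streak_n_inner seq k j2 := by
  intro j2
  induction j2 using check_streak_n_inner.induct seq k with
  | case1 j2 h heq ih => rw [check_streak_n_inner, dif_pos h, if_pos heq]; omega
  | case2 j2 h heq => rw [check_streak_n_inner, dif_pos h, if_neg heq]
  | case3 j2 h => rw [check_streak_n_inner, dif_neg h]

-- Source B's outer while over the runs, j = current run start
def check_streak_n_altLoop (seq : List Int) (n : Int) (j : Nat) : Int :=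
  if h : j < seq.length then
    let k := seq[j]
    let j2 := check_streak_n_inner seq k (j + 1)
    if k ≠ 0 ∧ (j2 : Int) - (j : Int) ≥ n then k else check_streak_n_altLoop seq n j2
  else 0
  termination_by seq.length - j
  decreasing_by
    have := check_streak_n_inner_ge seq seq[j] (j + 1)
    omega

def check_streak_n_alt (seq : List Int) (n : Int) : Int :=
  if (seq.length : Int) < n then 0 else check_streak_n_altLoop seq n 0

-- ===== PRECONDITION & SPEC =====
def Spec_check_streak_n (seq : List Int) (n : Int) (out : Int) : Prop := out = check_streak_n_alt seq n
instance (seq : List Int) (n : Int) (out : Int) : Decidable (Spec_check_streak_n seq n out) := by unfold Spec_check_streak_n; infer_instance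

-- ===== CLAIM (what is proved, stated in full; the proofs are below) =====
def Claim_equal_check_streak_n : Prop := ∀ (seq : List Int) (n : Int), Dom_check_streak_n seq n → Spec_check_streak_n seq n (check_streak_n seq n)

-- ===== LEMMAS AND PROOFS =====

-- proof-side model of one maximal run: length of the leading run of k and the remainder
def pvRunSplit (k : Int) : List Int → Nat × List Int
  | [] => (0, [])
  | x :: xs => if x = k then let p := pvRunSplit k xs; (p.1 + 1, p.2) else (0, x :: xs)

theorem pvRunSplit_len (k : Int) : ∀ xs : List Int, (pvRunSplit k xs).2.length ≤ xs.length := by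
  intro xs
  induction xs with
  | nil => simp [pvRunSplit]
  | cons x xs ih =>
    simp only [pvRunSplit]
    split
    · exact Nat.le_succ_of_le ih
    · simp

-- proof-side model of B's outer loop, on the suffix list
def pvAltLoopL (n : Int) : List Int → Int
  | [] => 0
  | k :: xs =>
    let p := pvRunSplit k xs
    if k ≠ 0 ∧ ((p.1 : Int) + 1) ≥ n then k else pvAltLoopL n p.2
  termination_by xs => xs.length
  decreasing_by
    simpa using Nat.lt_succ_of_le (pvRunSplit_len k xs)

theorem loopA_cons_eq (n st last : Int) (rest : List Int) :
    check_streak_n_loop n (last :: rest) st last =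
      if last ≠ 0 ∧ st + 1 ≥ n then last else check_streak_n_loop n rest (st + 1) last := by
  simp [check_streak_n_loop]

theorem loopA_cons_ne (n st last i : Int) (rest : List Int) (h : i ≠ last) :
    check_streak_n_loop n (i :: rest) st last =
      if i ≠ 0 ∧ (1 : Int) ≥ n then i else check_streak_n_loop n rest 1 i := by
  simp [check_streak_n_loop, h]

theorem runSplit_cons_eq (k : Int) (xs : List Int) :
    pvRunSplit k (k :: xs) = ((pvRunSplit k xs).1 + 1, (pvRunSplit k xs).2) := by
  simp [pvRunSplit]

theorem runSplit_cons_ne (k x : Int) (xs : List Int) (h : x ≠ k) :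
    pvRunSplit k (x :: xs) = (0, x :: xs) := by
  simp [pvRunSplit, h]

-- the inner while computes exactly the leading-run length of the suffix, and lands at its remainder
theorem inner_spec (seq : List Int) (k : Int) : ∀ j : Nat,
    check_streak_n_inner seq k j = j + (pvRunSplit k (seq.drop j)).1 ∧
    seq.drop (check_streak_n_inner seq k j) = (pvRunSplit k (seq.drop j)).2 := by
  intro j
  induction j using check_streak_n_inner.induct seq k with
  | case1 j h heq ih =>
    rw [check_streak_n_inner, dif_pos h, if_pos heq]
    have hd : seq.drop j = seq[j] :: seq.drop (j + 1) := List.drop_eq_getElem_cons h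
    rw [hd, heq, runSplit_cons_eq]
    exact ⟨by rw [ih.1]; omega, ih.2⟩
  | case2 j h heq =>
    rw [check_streak_n_inner, dif_pos h, if_neg heq]
    have hd : seq.drop j = seq[j] :: seq.drop (j + 1) := List.drop_eq_getElem_cons h
    rw [hd, runSplit_cons_ne k seq[j] _ heq]
    exact ⟨by omega, rfl⟩
  | case3 j h =>
    rw [check_streak_n_inner, dif_neg h]
    have hd : seq.drop j = [] := List.drop_eq_nil_of_le (by omega)
    rw [hd]
    simp [pvRunSplit]

-- B's index-based outer loop equals its list-suffix model
theorem altLoop_eq_listModel (seq : List Int) (n : Int) : ∀ j : Nat,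
    check_streak_n_altLoop seq n j = pvAltLoopL n (seq.drop j) := by
  intro j
  induction j using check_streak_n_altLoop.induct seq n with
  | case1 j h k j2 hcond =>
    rw [check_streak_n_altLoop, dif_pos h]
    have hd : seq.drop j = seq[j] :: seq.drop (j + 1) := List.drop_eq_getElem_cons h
    rw [hd, pvAltLoopL]
    have hs := inner_spec seq seq[j] (j + 1)
    have hj2 : (j2 : Int) = (j : Int) + 1 + ((pvRunSplit seq[j] (seq.drop (j + 1))).1 : Int) := by
      show ((check_streak_n_inner seq seq[j] (j + 1) : Nat) : Int) = _
      rw [hs.1]; push_cast; ring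
    simp only []
    rw [if_pos hcond, if_pos]
    refine ⟨hcond.1, ?_⟩
    have h1 := hcond.2
    omega
  | case2 j h k j2 hcond ih =>
    rw [check_streak_n_altLoop, dif_pos h]
    have hd : seq.drop j = seq[j] :: seq.drop (j + 1) := List.drop_eq_getElem_cons h
    rw [hd, pvAltLoopL]
    have hs := inner_spec seq seq[j] (j + 1)
    have hj2 : (j2 : Int) = (j : Int) + 1 + ((pvRunSplit seq[j] (seq.drop (j + 1))).1 : Int) := by
      show ((check_streak_n_inner seq seq[j] (j + 1) : Nat) : Int) = _
      rw [hs.1]; push_cast; ring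
    have hdrop : seq.drop j2 = (pvRunSplit seq[j] (seq.drop (j + 1))).2 := hs.2
    simp only []
    rw [if_neg hcond, if_neg]
    · rw [ih, hdrop]
    · intro hc
      apply hcond
      exact ⟨hc.1, by have := hc.2; omega⟩
  | case3 j h =>
    rw [check_streak_n_altLoop, dif_neg h]
    have hd : seq.drop j = [] := List.drop_eq_nil_of_le (by omega)
    rw [hd, pvAltLoopL]

-- A's loop, entered with current run value k counted c times (and no return triggered yet),
-- returns k as soon as the streak c + (leading run of k in xs) reaches n, else restarts run-wise on the rest.
theorem loopA_eq (n : Int) : ∀ (xs : List Int) (k c : Int), ¬ (k ≠ 0 ∧ c ≥ n) →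
    check_streak_n_loop n xs c k =
      (if k ≠ 0 ∧ c + ((pvRunSplit k xs).1 : Int) ≥ n then k
       else pvAltLoopL n (pvRunSplit k xs).2) := by
  intro xs
  induction xs with
  | nil =>
    intro k c h
    simp only [check_streak_n_loop, pvRunSplit]
    rw [if_neg (by push_cast; simpa using h)]
    simp [pvAltLoopL]
  | cons x rest ih =>
    intro k c h
    by_cases hx : x = k
    · subst hx
      rw [loopA_cons_eq, runSplit_cons_eq]
      by_cases hret : x ≠ 0 ∧ c + 1 ≥ n
      · rw [if_pos hret, if_pos]
        refine ⟨hret.1, ?_⟩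
        have h0 : (0:Int) ≤ ((pvRunSplit x rest).1 : Int) := Int.natCast_nonneg _
        push_cast
        omega
      · rw [if_neg hret, ih x (c+1) hret]
        have harith : c + 1 + ((pvRunSplit x rest).1 : Int) = c + (((pvRunSplit x rest).1 : Int) + 1) := by ring
        rw [harith]
        push_cast
        rfl
    · rw [loopA_cons_ne n c k x rest hx, runSplit_cons_ne k x rest hx]
      rw [show (if k ≠ 0 ∧ c + ((0:Nat) : Int) ≥ n then k else pvAltLoopL n (x :: rest)) =
            pvAltLoopL n (x :: rest) from if_neg (by push_cast; simpa using h)]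
      rw [show pvAltLoopL n (x :: rest) =
            (if x ≠ 0 ∧ ((pvRunSplit x rest).1 : Int) + 1 ≥ n then x
             else pvAltLoopL n (pvRunSplit x rest).2) from by rw [pvAltLoopL]]
      by_cases hret : x ≠ 0 ∧ (1:Int) ≥ n
      · rw [if_pos hret, if_pos]
        refine ⟨hret.1, ?_⟩
        have h0 : (0:Int) ≤ ((pvRunSplit x rest).1 : Int) := Int.natCast_nonneg _
        omega
      · rw [if_neg hret, ih x 1 hret]
        have harith : (1:Int) + ((pvRunSplit x rest).1 : Int) = ((pvRunSplit x rest).1 : Int) + 1 := by ring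
        rw [harith]

-- skipping the (virtual) leading run of zeros does not change the run-wise loop
theorem altLoopL_runSplit_zero (n : Int) (seq : List Int) :
    pvAltLoopL n (pvRunSplit 0 seq).2 = pvAltLoopL n seq := by
  cases seq with
  | nil => simp [pvRunSplit]
  | cons x rest =>
    by_cases hx : x = 0
    · subst hx
      rw [runSplit_cons_eq]
      conv_rhs => rw [pvAltLoopL]
      rw [if_neg (by simp)]
    · rw [runSplit_cons_ne 0 x rest hx]

-- ===== VERDICT (by name: the statement is the Claim_ definition above) =====
theorem check_streak_n_spec : Claim_equal_check_streak_n := by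
  intro seq n _
  unfold Spec_check_streak_n check_streak_n check_streak_n_alt
  by_cases hlen : (seq.length : Int) < n
  · simp [hlen]
  · rw [if_neg hlen, if_neg hlen]
    rw [loopA_eq n seq 0 0 (by simp)]
    rw [if_neg (by simp)]
    rw [altLoop_eq_listModel seq n 0, List.drop_zero]
    exact altLoopL_runSplit_zero n seq
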